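-- pv_equiv track=rewrite | github.com/18fadly-anthony/backr2 | backr2.py | relative_path
-- ===== SOURCE A (Python) =====
-- def relative_path(path, basename):
--     past_basename = False
--     l = ""
--     for i in path.split('/'):
--         if past_basename:
--             l += '/' + i
--         if i == basename:
--             past_basename = True
--     return l
-- ===== SOURCE B (Python) =====
-- def relative_path(path, basename):
--     parts = path.split('/')
--     if basename not in parts:
--         return ""
--     tail = parts[parts.index(basename) + 1:]
--     return "".join("/" + p for p in tail)
-- ===== Notes on version B (the rewrite author's own statement) =====
-- stated objective: simpler
-- what changed: Replaced A's stateful flag-driven accumulation loop with a locate-then-join decomposition: split, find the first occurrence index of basename, slice the tail after it and join '/'-prefixed parts.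
import Mathlib
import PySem

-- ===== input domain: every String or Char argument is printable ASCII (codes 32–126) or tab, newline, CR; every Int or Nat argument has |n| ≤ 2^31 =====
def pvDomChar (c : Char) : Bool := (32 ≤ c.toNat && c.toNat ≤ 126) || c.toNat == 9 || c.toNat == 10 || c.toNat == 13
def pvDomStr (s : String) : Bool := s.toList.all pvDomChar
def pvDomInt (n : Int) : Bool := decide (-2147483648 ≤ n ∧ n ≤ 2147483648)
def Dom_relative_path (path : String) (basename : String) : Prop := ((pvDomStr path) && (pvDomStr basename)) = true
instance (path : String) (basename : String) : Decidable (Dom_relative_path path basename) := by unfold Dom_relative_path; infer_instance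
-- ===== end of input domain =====

-- B replaces A's stateful flag-driven scan with a locate-then-join decomposition (objective: simpler).
-- ===== PORT A =====
-- one loop step of A: append '/' + i when past the basename, then update the flag
def pvStepA (basename : String) (st : Bool × String) (i : String) : Bool × String :=
  let st' := if st.1 then (st.1, st.2 ++ ("/" ++ i)) else st
  if i == basename then (true, st'.2) else st'

def relative_path (path : String) (basename : String) : String :=
  (((PySem.Str.split? path "/").getD []).foldl (pvStepA basename) (false, "")).2

-- ===== PORT B =====
def relative_path_alt (path : String) (basename : String) : String :=
  match PySem.List.index? ((PySem.Str.split? path "/").getD []) basename with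
  | none => ""
  | some k =>
      PySem.Str.join ""
        ((PySem.List.slice ((PySem.Str.split? path "/").getD []) (some ((k : Int) + 1)) none).map
          (fun p => "/" ++ p))

-- ===== PRECONDITION & SPEC =====
def Spec_relative_path (path : String) (basename : String) (out : String) : Prop := out = relative_path_alt path basename
instance (path : String) (basename : String) (out : String) : Decidable (Spec_relative_path path basename out) := by unfold Spec_relative_path; infer_instance

-- ===== CLAIM (what is proved, stated in full; the proofs are below) =====
def Claim_equal_relative_path : Prop := ∀ (path : String) (basename : String), Dom_relative_path path basename → Spec_relative_path path basename (relative_path path basename)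

-- ===== LEMMAS AND PROOFS =====

theorem joinSlash_cons (i : String) (l : List String) :
    PySem.Str.join "" ((i :: l).map (fun p => "/" ++ p)) =
      ("/" ++ i) ++ PySem.Str.join "" (l.map (fun p => "/" ++ p)) := by
  rw [← String.toList_inj]
  cases l with
  | nil =>
      simp [PySem.Str.toList_join, PySem.Chars.join_singleton, PySem.Chars.join_nil]
  | cons a l =>
      simp [PySem.Str.toList_join, PySem.Chars.join_cons_cons]

theorem joinSlash_nil :
    PySem.Str.join "" (([] : List String).map (fun p => "/" ++ p)) = "" := by
  rw [← String.toList_inj]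
  simp [PySem.Str.toList_join, PySem.Chars.join_nil]

theorem foldl_stepA_true (basename : String) (l : List String) :
    ∀ s : String, l.foldl (pvStepA basename) (true, s) =
      (true, s ++ PySem.Str.join "" (l.map (fun p => "/" ++ p))) := by
  induction l with
  | nil =>
      intro s
      rw [joinSlash_nil]
      simp
  | cons i l ih =>
      intro s
      have hstep : pvStepA basename (true, s) i = (true, s ++ ("/" ++ i)) := by
        simp [pvStepA]
      rw [List.foldl_cons, hstep, ih, joinSlash_cons, String.append_assoc]

theorem foldl_stepA_false (basename : String) (l : List String) :
    (l.foldl (pvStepA basename) (false, "")).2 =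
      (match PySem.List.index? l basename with
       | none => ""
       | some k => PySem.Str.join "" ((l.drop (k + 1)).map (fun p => "/" ++ p))) := by
  induction l with
  | nil => simp [PySem.List.index?]
  | cons i l ih =>
      by_cases h : i = basename
      · subst h
        have hstep : pvStepA i (false, "") i = (true, "") := by simp [pvStepA]
        rw [List.foldl_cons, hstep, foldl_stepA_true, PySem.List.index?_cons_self]
        rw [← String.toList_inj]
        simp
      · have hstep : pvStepA basename (false, "") i = (false, "") := by
          simp [pvStepA, h]
        rw [List.foldl_cons, hstep, ih, PySem.List.index?_cons_of_ne _ h]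
        cases PySem.List.index? l basename with
        | none => simp
        | some k => simp

theorem relative_path_eq_alt (path basename : String) :
    relative_path path basename = relative_path_alt path basename := by
  unfold relative_path relative_path_alt
  rw [foldl_stepA_false]
  cases hk : PySem.List.index? ((PySem.Str.split? path "/").getD []) basename with
  | none => rfl
  | some k =>
      have hc : ((k : Int) + 1) = ((k + 1 : Nat) : Int) := by push_cast; ring
      simp only [hc, PySem.List.slice_from_natCast]

-- ===== VERDICT (by name: the statement is the Claim_ definition above) =====
theorem relative_path_spec : Claim_equal_relative_path := by
  intro path basename _
  unfold Spec_relative_path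
  exact relative_path_eq_alt path basename
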